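-- pv_equiv track=rewrite | github.com/OmAmar106/Codeforces-Rating-Predictor | Model/model.py | func
-- ===== SOURCE A (Python) =====
-- rating_list = ['1200', '1300', '1400', '1500',    '1600', '1700', '1800', '1900', '2000' , '2100', '2200', '2300', '2400', '2500', '2600', '2700', '2800', '2900', '3000']
--
-- def func(user):
--     X = []
--     sum = 0
--     for i in rating_list[:4]:
--         if i in user['RatingDistribution']:
--             sum += user['RatingDistribution'][i]
--     X.append(sum)
--     sum = 0
--     for i in rating_list[4:7]:
--         if i in user['RatingDistribution']:
--             sum += user['RatingDistribution'][i]
--     X.append(sum)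
--     sum = 0
--     for i in rating_list[7:9]:
--         if i in user['RatingDistribution']:
--             sum += user['RatingDistribution'][i]
--     X.append(sum)
--     sum = 0
--     for i in rating_list[9:11]:
--         if i in user['RatingDistribution']:
--             sum += user['RatingDistribution'][i]
--     X.append(sum)
--     sum = 0
--     for i in rating_list[11:13]:
--         if i in user['RatingDistribution']:
--             sum += user['RatingDistribution'][i]
--     X.append(sum)
--     sum = 0
--     for i in rating_list[13:15]:
--         if i in user['RatingDistribution']:
--             sum += user['RatingDistribution'][i]
--     X.append(sum)
--     sum = 0
--     for i in rating_list[15:17]: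
--         if i in user['RatingDistribution']:
--             sum += user['RatingDistribution'][i]
--     X.append(sum)
--     sum = 0
--     for i in rating_list[17:19]:
--         if i in user['RatingDistribution']:
--             sum += user['RatingDistribution'][i]
--     X.append(sum)
--     sum = 0
--     return X
-- ===== SOURCE B (Python) =====
-- def _bucket(k):
--     # rating keys are exactly the 4-char strings n*100 for n in 12..30:
--     # parse the two leading digits and bucket arithmetically.
--     if len(k) == 4 and k[2] == '0' and k[3] == '0' and k[0] in '123' and k[1].isdigit():
--         n = 10 * (ord(k[0]) - 48) + (ord(k[1]) - 48)
--         if 12 <= n <= 30: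
--             if n <= 15:
--                 return 0
--             if n <= 18:
--                 return 1
--             return 2 + (n - 19) // 2
--     return None
--
--
-- def func(user):
--     X = [0] * 8
--     for k, v in user['RatingDistribution'].items():
--         g = _bucket(k)
--         if g is not None:
--             X[g] += v
--     return X
-- ===== Notes on version B (the rewrite author's own statement) =====
-- stated objective: alternative
-- what changed: Instead of A's eight scans over a fixed 19-key rating list probing the dict per key, B makes one input-driven pass over the dict items and computes each key's bucket arithmetically from its digits (no rating list or table at all).
import Mathlib
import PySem

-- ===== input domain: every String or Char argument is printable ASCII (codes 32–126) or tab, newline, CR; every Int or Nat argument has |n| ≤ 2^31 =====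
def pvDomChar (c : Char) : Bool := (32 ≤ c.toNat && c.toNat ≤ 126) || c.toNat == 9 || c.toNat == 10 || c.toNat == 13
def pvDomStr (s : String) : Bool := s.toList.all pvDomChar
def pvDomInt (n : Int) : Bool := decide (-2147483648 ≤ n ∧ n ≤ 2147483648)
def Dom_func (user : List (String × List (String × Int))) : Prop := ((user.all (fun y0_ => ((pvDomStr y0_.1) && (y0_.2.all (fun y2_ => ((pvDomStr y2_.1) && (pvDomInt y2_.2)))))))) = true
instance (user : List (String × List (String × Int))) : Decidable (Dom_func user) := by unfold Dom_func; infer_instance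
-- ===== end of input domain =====

-- B replaces A's eight staged scans over a fixed 19-key rating list by ONE pass over the
-- input dict's items, computing each key's bucket arithmetically from its digit characters
-- (no rating list/table at all). Alternative decomposition; same cost on these tiny inputs.

-- ===== PORT A =====
def ratingList : List String := ["1200", "1300", "1400", "1500", "1600", "1700", "1800", "1900", "2000", "2100", "2200", "2300", "2400", "2500", "2600", "2700", "2800", "2900", "3000"]

-- one of A's 'for i in …: if i in dist: sum += dist[i]' loops (dict membership/lookup = first match)
def funcGroup (d : List (String × Int)) (ks : List String) : Int :=
  ks.foldl (fun s i =>
    match d.find? (fun p => p.1 == i) with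
    | some p => s + p.2
    | none => s) 0

def func (user : List (String × List (String × Int))) : List Int :=
  match user.find? (fun p => p.1 == "RatingDistribution") with
  | none => []   -- Python raises KeyError here; excluded by Pre_func
  | some q =>
    let d := q.2
    [funcGroup d (PySem.List.slice ratingList none (some 4)),
     funcGroup d (PySem.List.slice ratingList (some 4) (some 7)),
     funcGroup d (PySem.List.slice ratingList (some 7) (some 9)),
     funcGroup d (PySem.List.slice ratingList (some 9) (some 11)),
     funcGroup d (PySem.List.slice ratingList (some 11) (some 13)),
     funcGroup d (PySem.List.slice ratingList (some 13) (some 15)),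
     funcGroup d (PySem.List.slice ratingList (some 15) (some 17)),
     funcGroup d (PySem.List.slice ratingList (some 17) (some 19))]

-- ===== PORT B =====
-- _bucket(k): 'len(k) == 4 and k[2] == '0' and k[3] == '0'' is ported as a 4-element match on
-- k.toList (exact: k[i] on a 4-char string); ''k[0] in '123''' is the 3-way char disjunction
-- (exact: single-char membership in a 3-char string); ord(c) is c.toNat.
def pyBucket (k : String) : Option Int :=
  match k.toList with
  | [a, b, c, d] =>
    if c == '0' && d == '0' && (a == '1' || a == '2' || a == '3') && PySem.Chars.isdigit b then
      let n : Int := 10 * ((a.toNat : Int) - 48) + ((b.toNat : Int) - 48)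
      if 12 ≤ n ∧ n ≤ 30 then
        some (if n ≤ 15 then (0 : Int) else if n ≤ 18 then 1 else 2 + PySem.Int.floordiv (n - 19) 2)
      else none
    else none
  | _ => none

def func_alt (user : List (String × List (String × Int))) : List Int :=
  match user.find? (fun p => p.1 == "RatingDistribution") with
  | none => []   -- Python raises KeyError here; excluded by Pre_func
  | some q =>
    q.2.foldl (fun X e =>
      match pyBucket e.1 with
      | some g => X.set g.toNat (X.getD g.toNat 0 + e.2)   -- X[g] += v; 0 ≤ g < 8 always
      | none => X) [0, 0, 0, 0, 0, 0, 0, 0]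

-- ===== PRECONDITION & SPEC =====
-- Pre_ excludes inputs without a 'RatingDistribution' key (A raises KeyError there) and
-- association lists whose 'RatingDistribution' value has duplicate keys (a dict cannot:
-- such lists are artefacts of the dict-as-assoc-list encoding, unreachable from Python).
def Pre_func (user : List (String × List (String × Int))) : Prop :=
  ((user.find? (fun p => p.1 == "RatingDistribution")).any
    (fun q => decide ((q.2.map Prod.fst).Nodup))) = true
instance (user : List (String × List (String × Int))) : Decidable (Pre_func user) := by unfold Pre_func; infer_instance
def pvWitness_func : (List (String × List (String × Int))) := [("RatingDistribution", [("1200", 3), ("1700", 5)])]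

def Spec_func (user : List (String × List (String × Int))) (out : List Int) : Prop := out = func_alt user
instance (user : List (String × List (String × Int))) (out : List Int) : Decidable (Spec_func user out) := by unfold Spec_func; infer_instance

-- ===== CLAIM (what is proved, stated in full; the proofs are below) =====
def Claim_equal_func : Prop := ∀ (user : List (String × List (String × Int))), Dom_func user → Pre_func user → Spec_func user (func user)

-- ===== LEMMAS AND PROOFS =====

-- the 19 valid rating keys with their bucket numbers (proof-side table; neither port uses it)
def pairs : List (String × Int) :=
  [("1200", 0), ("1300", 0), ("1400", 0), ("1500", 0),
   ("1600", 1), ("1700", 1), ("1800", 1),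
   ("1900", 2), ("2000", 2),
   ("2100", 3), ("2200", 3),
   ("2300", 4), ("2400", 4),
   ("2500", 5), ("2600", 5),
   ("2700", 6), ("2800", 6),
   ("2900", 7), ("3000", 7)]

theorem isdigit_range (c : Char) (h : PySem.Chars.isdigit c = true) : 48 ≤ c.toNat ∧ c.toNat ≤ 57 := by
  simp [PySem.Chars.isdigit, Char.le_def, UInt32.le_iff_toNat_le] at h
  exact h

theorem bchar (b : Char) (m : Nat) (h : b.toNat = m) : b = Char.ofNat m := by
  subst h; exact (Char.ofNat_toNat b).symm

-- characterisation of B's arithmetic bucket function: it hits exactly the 19 rating keys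
theorem pyBucket_mem (k : String) (g : Int) : pyBucket k = some g ↔ (k, g) ∈ pairs := by
  constructor
  · intro h
    unfold pyBucket at h
    split at h
    case h_2 => cases h
    case h_1 a b c d heq =>
      have hk : k = String.ofList [a, b, c, d] := by
        apply String.toList_inj.mp; rw [heq]; simp
      subst hk
      split at h
      case isFalse => cases h
      case isTrue hcond =>
        simp only [Bool.and_eq_true, Bool.or_eq_true, beq_iff_eq] at hcond
        obtain ⟨⟨⟨hc, hd⟩, ha⟩, hb⟩ := hcond
        subst hc hd
        obtain ⟨hb1, hb2⟩ := isdigit_range b hb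
        dsimp only at h
        split at h
        case isFalse => cases h
        case isTrue hn =>
          rcases ha with (ha|ha)|ha <;> subst ha
          · simp only [show ('1').toNat = 49 from rfl] at hn
            have hx : b.toNat = 50 ∨ b.toNat = 51 ∨ b.toNat = 52 ∨ b.toNat = 53 ∨ b.toNat = 54 ∨ b.toNat = 55 ∨ b.toNat = 56 ∨ b.toNat = 57 := by omega
            rcases hx with h'|h'|h'|h'|h'|h'|h'|h' <;>
            · have hbv := bchar b _ h'
              subst hbv; injection h with h; subst h; decide
          · simp only [show ('2').toNat = 50 from rfl] at hn
            have hx : b.toNat = 48 ∨ b.toNat = 49 ∨ b.toNat = 50 ∨ b.toNat = 51 ∨ b.toNat = 52 ∨ b.toNat = 53 ∨ b.toNat = 54 ∨ b.toNat = 55 ∨ b.toNat = 56 ∨ b.toNat = 57 := by omega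
            rcases hx with h'|h'|h'|h'|h'|h'|h'|h'|h'|h' <;>
            · have hbv := bchar b _ h'
              subst hbv; injection h with h; subst h; decide
          · simp only [show ('3').toNat = 51 from rfl] at hn
            have hx : b.toNat = 48 := by omega
            have hbv := bchar b _ hx
            subst hbv; injection h with h; subst h; decide
  · intro h
    simp only [pairs, List.mem_cons, List.not_mem_nil, or_false, Prod.mk.injEq] at h
    rcases h with ⟨rfl,rfl⟩|⟨rfl,rfl⟩|⟨rfl,rfl⟩|⟨rfl,rfl⟩|⟨rfl,rfl⟩|⟨rfl,rfl⟩|⟨rfl,rfl⟩|⟨rfl,rfl⟩|⟨rfl,rfl⟩|⟨rfl,rfl⟩|⟨rfl,rfl⟩|⟨rfl,rfl⟩|⟨rfl,rfl⟩|⟨rfl,rfl⟩|⟨rfl,rfl⟩|⟨rfl,rfl⟩|⟨rfl,rfl⟩|⟨rfl,rfl⟩|⟨rfl,rfl⟩ <;> decide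

-- value A adds for rating key k (0 if k is not in the dict; first match)
def tval (d : List (String × Int)) (k : String) : Int :=
  match d.find? (fun e => e.1 == k) with
  | some e => e.2
  | none => 0

-- sum B's pass puts into bucket g
def gsum (d : List (String × Int)) (g : Int) : Int :=
  ((d.filter (fun e => pyBucket e.1 == some g)).map (fun e => e.2)).sum

theorem funcGroup_sum (d : List (String × Int)) (ks : List String) :
    funcGroup d ks = (ks.map (tval d)).sum := by
  suffices h : ∀ s : Int, ks.foldl (fun s i =>
      match d.find? (fun p => p.1 == i) with
      | some p => s + p.2
      | none => s) s = s + (ks.map (tval d)).sum by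
    simpa [funcGroup] using h 0
  induction ks with
  | nil => intro s; simp
  | cons k ks ih =>
    intro s
    simp only [List.foldl_cons, List.map_cons, List.sum_cons, ih]
    unfold tval
    cases d.find? (fun e => e.1 == k) <;> simp [add_assoc]

theorem tval_cons (k0 : String) (v : Int) (d : List (String × Int)) (k : String) :
    tval ((k0, v) :: d) k = if (k0 == k) then v else tval d k := by
  simp only [tval, List.find?_cons]
  cases h : (k0 == k) <;> simp

theorem tval_zero (d : List (String × Int)) (k : String) (h : k ∉ d.map Prod.fst) :
    tval d k = 0 := by
  have hf : d.find? (fun e => e.1 == k) = none := by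
    rw [List.find?_eq_none]
    intro e he hbe
    exact h (List.mem_map.mpr ⟨e, he, beq_iff_eq.mp hbe⟩)
  simp [tval, hf]

theorem gsum_cons (k : String) (v : Int) (d : List (String × Int)) (g : Int) :
    gsum ((k, v) :: d) g = (if pyBucket k == some g then v else 0) + gsum d g := by
  simp only [gsum, List.filter_cons]
  split <;> simp_all

theorem bridge (d : List (String × Int)) (hnd : (d.map Prod.fst).Nodup)
    (K : List String) (hKnd : K.Nodup) (g : Int)
    (hK : ∀ k, k ∈ K ↔ (k, g) ∈ pairs) :
    (K.map (tval d)).sum = gsum d g := by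
  induction d with
  | nil =>
    have : ∀ k ∈ K, tval [] k = 0 := fun k _ => rfl
    simp [gsum, List.map_congr_left this]
  | cons e d ih =>
    obtain ⟨k0, v⟩ := e
    simp only [List.map_cons, List.nodup_cons] at hnd
    obtain ⟨hk0d, hndd⟩ := hnd
    rw [gsum_cons]
    by_cases hk0 : k0 ∈ K
    · have hperm : K.Perm (k0 :: K.erase k0) := List.perm_cons_erase hk0
      have hsum1 : (K.map (tval ((k0, v) :: d))).sum
          = v + ((K.erase k0).map (tval d)).sum := by
        rw [(hperm.map _).sum_eq]
        simp only [List.map_cons, List.sum_cons, tval_cons, BEq.rfl, if_true]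
        refine congrArg (v + ·) (congrArg List.sum (List.map_congr_left ?_))
        intro k hk
        rw [tval_cons]
        have hne : k ≠ k0 := ((hKnd.mem_erase_iff).mp hk).1
        simp [beq_eq_false_iff_ne.mpr (fun h => hne h.symm)]
      have hsum2 : (K.map (tval d)).sum = ((K.erase k0).map (tval d)).sum := by
        rw [(hperm.map _).sum_eq]
        simp [List.map_cons, tval_zero d k0 hk0d]
      have hpb : pyBucket k0 = some g := (pyBucket_mem k0 g).mpr ((hK k0).mp hk0)
      rw [hsum1, hpb]
      simp only [BEq.rfl, if_true]
      rw [← hsum2, ih hndd]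
    · have hmap : (K.map (tval ((k0, v) :: d))) = K.map (tval d) := by
        apply List.map_congr_left
        intro k hk
        rw [tval_cons]
        have hne : k0 ≠ k := fun h => hk0 (h ▸ hk)
        simp [beq_eq_false_iff_ne.mpr hne]
      have hpb : ¬ pyBucket k0 = some g := fun h => hk0 ((hK k0).mpr ((pyBucket_mem k0 g).mp h))
      rw [hmap, ih hndd]
      simp [hpb]

theorem foldl_inv (d : List (String × Int)) :
    ∀ (x0 x1 x2 x3 x4 x5 x6 x7 : Int),
    d.foldl (fun X e =>
      match pyBucket e.1 with
      | some g => X.set g.toNat (X.getD g.toNat 0 + e.2)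
      | none => X) [x0, x1, x2, x3, x4, x5, x6, x7] =
    [x0 + gsum d 0, x1 + gsum d 1, x2 + gsum d 2, x3 + gsum d 3,
     x4 + gsum d 4, x5 + gsum d 5, x6 + gsum d 6, x7 + gsum d 7] := by
  induction d with
  | nil => intro x0 x1 x2 x3 x4 x5 x6 x7; simp [gsum]
  | cons e d ih =>
    intro x0 x1 x2 x3 x4 x5 x6 x7
    obtain ⟨k, v⟩ := e
    rw [List.foldl_cons]
    rcases hpb : pyBucket k with _ | g
    · exact (ih x0 x1 x2 x3 x4 x5 x6 x7).trans (by simp [gsum_cons, hpb])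
    · have hg : g = 0 ∨ g = 1 ∨ g = 2 ∨ g = 3 ∨ g = 4 ∨ g = 5 ∨ g = 6 ∨ g = 7 := by
        have hmem := (pyBucket_mem k g).mp hpb
        have := List.mem_map_of_mem (f := Prod.snd) hmem
        simp only [pairs, List.map_cons, List.map_nil, List.mem_cons, List.not_mem_nil, or_false] at this
        omega
      rcases hg with rfl|rfl|rfl|rfl|rfl|rfl|rfl|rfl
      · exact (ih (x0 + v) x1 x2 x3 x4 x5 x6 x7).trans (by simp [gsum_cons, hpb, add_assoc])
      · exact (ih x0 (x1 + v) x2 x3 x4 x5 x6 x7).trans (by simp [gsum_cons, hpb, add_assoc])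
      · exact (ih x0 x1 (x2 + v) x3 x4 x5 x6 x7).trans (by simp [gsum_cons, hpb, add_assoc])
      · exact (ih x0 x1 x2 (x3 + v) x4 x5 x6 x7).trans (by simp [gsum_cons, hpb, add_assoc])
      · exact (ih x0 x1 x2 x3 (x4 + v) x5 x6 x7).trans (by simp [gsum_cons, hpb, add_assoc])
      · exact (ih x0 x1 x2 x3 x4 (x5 + v) x6 x7).trans (by simp [gsum_cons, hpb, add_assoc])
      · exact (ih x0 x1 x2 x3 x4 x5 (x6 + v) x7).trans (by simp [gsum_cons, hpb, add_assoc])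
      · exact (ih x0 x1 x2 x3 x4 x5 x6 (x7 + v)).trans (by simp [gsum_cons, hpb, add_assoc])

-- the keys of one of A's slice groups are exactly the pairs-table keys with that bucket number
theorem hK_of_filter (g : Int) (k : String) :
    k ∈ (pairs.filter (fun p => p.2 == g)).map Prod.fst ↔ (k, g) ∈ pairs := by
  simp only [List.mem_map, List.mem_filter, beq_iff_eq]
  constructor
  · rintro ⟨p, ⟨hp, hsnd⟩, hfst⟩
    have : p = (k, g) := Prod.ext hfst hsnd
    exact this ▸ hp
  · intro hp
    exact ⟨(k, g), ⟨hp, rfl⟩, rfl⟩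

-- ===== VERDICT (by name: the statement is the Claim_ definition above) =====
theorem func_spec : Claim_equal_func := by
  intro user _ hpre
  unfold Spec_func func func_alt
  cases hf : user.find? (fun p => p.1 == "RatingDistribution") with
  | none => simp [Pre_func, hf] at hpre
  | some q =>
    have hnd : (q.2.map Prod.fst).Nodup := by
      simp [Pre_func, hf] at hpre; exact hpre
    dsimp only
    rw [foldl_inv q.2]
    have h0 : PySem.List.slice ratingList none (some 4) = (pairs.filter (fun p => p.2 == (0:Int))).map Prod.fst := by decide
    have h1 : PySem.List.slice ratingList (some 4) (some 7) = (pairs.filter (fun p => p.2 == (1:Int))).map Prod.fst := by decide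
    have h2 : PySem.List.slice ratingList (some 7) (some 9) = (pairs.filter (fun p => p.2 == (2:Int))).map Prod.fst := by decide
    have h3 : PySem.List.slice ratingList (some 9) (some 11) = (pairs.filter (fun p => p.2 == (3:Int))).map Prod.fst := by decide
    have h4 : PySem.List.slice ratingList (some 11) (some 13) = (pairs.filter (fun p => p.2 == (4:Int))).map Prod.fst := by decide
    have h5 : PySem.List.slice ratingList (some 13) (some 15) = (pairs.filter (fun p => p.2 == (5:Int))).map Prod.fst := by decide
    have h6 : PySem.List.slice ratingList (some 15) (some 17) = (pairs.filter (fun p => p.2 == (6:Int))).map Prod.fst := by decide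
    have h7 : PySem.List.slice ratingList (some 17) (some 19) = (pairs.filter (fun p => p.2 == (7:Int))).map Prod.fst := by decide
    simp only [h0, h1, h2, h3, h4, h5, h6, h7, funcGroup_sum]
    rw [bridge q.2 hnd _ (by decide) 0 (hK_of_filter 0),
        bridge q.2 hnd _ (by decide) 1 (hK_of_filter 1),
        bridge q.2 hnd _ (by decide) 2 (hK_of_filter 2),
        bridge q.2 hnd _ (by decide) 3 (hK_of_filter 3),
        bridge q.2 hnd _ (by decide) 4 (hK_of_filter 4),
        bridge q.2 hnd _ (by decide) 5 (hK_of_filter 5),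
        bridge q.2 hnd _ (by decide) 6 (hK_of_filter 6),
        bridge q.2 hnd _ (by decide) 7 (hK_of_filter 7)]
    simp
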